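-- pv_equiv track=rewrite | github.com/Ag3497120/verantyx-v6 | arc/world_commands.py | trace_outline_4
-- ===== SOURCE A (Python) =====
-- from collections import Counter, defaultdict
--
-- def _bg(g):
--     c = Counter()
--     for row in g: c.update(row)
--     return c.most_common(1)[0][0]
--
-- def trace_outline_4(g):
--     """オブジェクトの4方向輪郭"""
--     bg=_bg(g); h,w=len(g),len(g[0]); res=[[bg]*w for _ in range(h)]
--     for r in range(h):
--         for c in range(w):
--             if g[r][c]!=bg:
--                 for dr,dc in [(-1,0),(1,0),(0,-1),(0,1)]:
--                     nr,nc=r+dr,c+dc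
--                     if not(0<=nr<h and 0<=nc<w) or g[nr][nc]==bg:
--                         res[r][c]=g[r][c]; break
--     return res
-- ===== SOURCE B (Python) =====
-- from collections import Counter
--
-- def _bg(g):
--     c = Counter()
--     for row in g: c.update(row)
--     return c.most_common(1)[0][0]
--
-- def trace_outline_4(g):
--     """Scatter from background cells instead of gathering per foreground cell."""
--     bg = _bg(g)
--     h, w = len(g), len(g[0])
--     res = [[bg] * w for _ in range(h)]
--     # pass 1: every background cell pushes each in-bounds non-background
--     # neighbour into the outline
--     for r in range(h):
--         for c in range(w):
--             if g[r][c] == bg: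
--                 for nr, nc in ((r - 1, c), (r + 1, c), (r, c - 1), (r, c + 1)):
--                     if 0 <= nr < h and 0 <= nc < w and g[nr][nc] != bg:
--                         res[nr][nc] = g[nr][nc]
--     # pass 2: non-background cells on the grid border are outline as well
--     for r in range(h):
--         for c in range(w):
--             if (r == 0 or r == h - 1 or c == 0 or c == w - 1) and g[r][c] != bg:
--                 res[r][c] = g[r][c]
--     return res
-- ===== Notes on version B (the rewrite author's own statement) =====
-- stated objective: faster
-- what changed: Inverts the traversal: instead of gathering per foreground cell (scan its 4 neighbours with a break), B scatters from each background cell into its in-bounds non-background neighbours and adds a second pass marking non-background border cells (A's out-of-bounds case).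
import Mathlib
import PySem

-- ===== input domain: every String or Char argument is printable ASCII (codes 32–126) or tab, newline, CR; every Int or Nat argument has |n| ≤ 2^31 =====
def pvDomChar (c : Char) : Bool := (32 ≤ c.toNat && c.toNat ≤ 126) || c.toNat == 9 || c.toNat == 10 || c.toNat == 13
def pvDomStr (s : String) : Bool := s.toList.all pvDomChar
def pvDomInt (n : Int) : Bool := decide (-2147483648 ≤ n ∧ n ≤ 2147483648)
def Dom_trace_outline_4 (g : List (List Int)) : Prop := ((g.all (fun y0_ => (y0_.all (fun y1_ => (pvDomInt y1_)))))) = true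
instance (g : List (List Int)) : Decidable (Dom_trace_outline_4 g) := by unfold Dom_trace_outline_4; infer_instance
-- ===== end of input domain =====

-- B inverts the traversal: background cells scatter into their in-bounds
-- non-background neighbours plus a border pass, instead of A's
-- per-foreground-cell gather with a break (measured faster by a constant
-- factor on the generated inputs; same asymptotic cost).


-- ===== PORT A =====
-- shared helper: _bg (both A and B call the identical module-level _bg).
-- Counter built row by row; most_common(1)[0][0] = first key of the stable
-- count-descending sort of the items (CPython's nlargest tie-break).
def bgOf (g : List (List Int)) : Int :=
  let c : PySem.Dict Int Int :=
    g.foldl (fun d row => row.foldl (fun (d : PySem.Dict Int Int) x => d.insert x (d.getD x 0 + 1)) d)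
      (PySem.Dict.mk [])
  ((PySem.List.sorted c.items (fun kv => kv.2) true).headD (0, 0)).1

-- g[r][c] for indices both programs only evaluate when 0 ≤ index < bound and
-- (under Pre_) within the row: default 0 is never the returned value there.
def gget (g : List (List Int)) (r c : Int) : Int :=
  PySem.List.pyGetD (PySem.List.pyGetD g r []) c 0

-- res[r][c] = v for 0 ≤ r < len(res), 0 ≤ c < len(res[r]) (always in range here)
def setCell (m : List (List Int)) (r c : Int) (v : Int) : List (List Int) :=
  m.set r.toNat ((m.getD r.toNat []).set c.toNat v)

-- port of A: res initialised to all-bg; for each non-bg cell, the delta loop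
-- with break writes res[r][c] = g[r][c] iff SOME delta is out of bounds or a
-- bg neighbour — the break-loop's only effect, rendered as List.any.
def trace_outline_4 (g : List (List Int)) : List (List Int) :=
  let bg := bgOf g
  let h : Int := g.length
  let w : Int := (g.headD []).length
  let res := List.replicate g.length (List.replicate (g.headD []).length bg)
  (PySem.List.pyRange 0 h 1).foldl (fun res r =>
    (PySem.List.pyRange 0 w 1).foldl (fun res c =>
      if (gget g r c != bg) &&
         ([((-1 : Int), (0 : Int)), (1, 0), (0, -1), (0, 1)].any (fun d =>
            !(decide (0 ≤ r + d.1) && decide (r + d.1 < h) &&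
              decide (0 ≤ c + d.2) && decide (c + d.2 < w)) ||
            (gget g (r + d.1) (c + d.2) == bg)))
      then setCell res r c (gget g r c) else res) res) res

-- ===== PORT B =====
def trace_outline_4_alt (g : List (List Int)) : List (List Int) :=
  let bg := bgOf g
  let h : Int := g.length
  let w : Int := (g.headD []).length
  let res0 := List.replicate g.length (List.replicate (g.headD []).length bg)
  -- pass 1: every bg cell pushes each in-bounds non-bg neighbour into the outline
  let res1 := (PySem.List.pyRange 0 h 1).foldl (fun res r =>
    (PySem.List.pyRange 0 w 1).foldl (fun res c =>
      if gget g r c == bg then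
        [(r - 1, c), (r + 1, c), (r, c - 1), (r, c + 1)].foldl (fun res p =>
          if (decide (0 ≤ p.1) && decide (p.1 < h) &&
              decide (0 ≤ p.2) && decide (p.2 < w)) && (gget g p.1 p.2 != bg)
          then setCell res p.1 p.2 (gget g p.1 p.2) else res) res
      else res) res) res0
  -- pass 2: non-bg cells on the grid border are outline as well
  (PySem.List.pyRange 0 h 1).foldl (fun res r =>
    (PySem.List.pyRange 0 w 1).foldl (fun res c =>
      if (r == 0 || r == h - 1 || c == 0 || c == w - 1) && (gget g r c != bg)
      then setCell res r c (gget g r c) else res) res) res1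

-- ===== PRECONDITION & SPEC =====
-- Exactly where Python A returns: an empty grid or all-empty rows raise
-- IndexError (len(g[0]) resp. most_common(1)[0]), and a row shorter than
-- len(g[0]) raises IndexError on g[r][c].
def Pre_trace_outline_4 (g : List (List Int)) : Prop :=
  g ≠ [] ∧ (∃ row ∈ g, row ≠ []) ∧ ∀ row ∈ g, (g.headD []).length ≤ row.length
instance (g : List (List Int)) : Decidable (Pre_trace_outline_4 g) := by
  unfold Pre_trace_outline_4; infer_instance

def pvWitness_trace_outline_4 : List (List Int) := [[0, 0], [0, 1]]

def Spec_trace_outline_4 (g : List (List Int)) (out : List (List Int)) : Prop := out = trace_outline_4_alt g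
instance (g : List (List Int)) (out : List (List Int)) : Decidable (Spec_trace_outline_4 g out) := by unfold Spec_trace_outline_4; infer_instance

-- ===== CLAIM (what is proved, stated in full; the proofs are below) =====
def Claim_equal_trace_outline_4 : Prop := ∀ (g : List (List Int)), Dom_trace_outline_4 g → Pre_trace_outline_4 g → Spec_trace_outline_4 g (trace_outline_4 g)

-- ===== LEMMAS AND PROOFS =====

-- shape of an h×w matrix
def Sh (h w : Nat) (m : List (List Int)) : Prop :=
  m.length = h ∧ ∀ row ∈ m, row.length = w

def getC (m : List (List Int)) (r c : Nat) : Int := (m.getD r []).getD c 0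

lemma sh_replicate (h w : Nat) (bg : Int) : Sh h w (List.replicate h (List.replicate w bg)) := by
  constructor
  · simp
  · intro row hrow
    simp_all [List.eq_of_mem_replicate hrow]

lemma getC_replicate (h w : Nat) (bg : Int) (r c : Nat) (hr : r < h) (hc : c < w) :
    getC (List.replicate h (List.replicate w bg)) r c = bg := by
  simp [getC, List.getD, hr, hc]

lemma getD_set_char (l : List Int) (i j : Nat) (a d : Int) :
    (l.set i a).getD j d = if i = j ∧ j < l.length then a else l.getD j d := by
  simp [List.getD, List.getElem?_set]
  split_ifs <;> simp_all

lemma getD_set_char' (l : List (List Int)) (i j : Nat) (a : List Int) :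
    (l.set i a).getD j [] = if i = j ∧ j < l.length then a else l.getD j [] := by
  simp [List.getD, List.getElem?_set]
  split_ifs <;> simp_all


lemma setCell_props (h w : Nat) (m : List (List Int)) (hm : Sh h w m)
    (r c : Int) (hr0 : 0 ≤ r) (hr : r < (h : Int)) (hc0 : 0 ≤ c) (hc : c < (w : Int)) (v : Int) :
    Sh h w (setCell m r c v) ∧ ∀ (R C : Nat), R < h → C < w →
      getC (setCell m r c v) R C = if r.toNat = R ∧ c.toNat = C then v else getC m R C := by
  obtain ⟨hlen, hrows⟩ := hm
  have hi : r.toNat < m.length := by omega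
  have hrowmem : m.getD r.toNat [] ∈ m := by
    rw [List.getD_eq_getElem m [] hi]; exact List.getElem_mem hi
  have hrowlen : (m.getD r.toNat []).length = w := hrows _ hrowmem
  constructor
  · constructor
    · simp [setCell, hlen]
    · intro row hrow
      rcases List.mem_or_eq_of_mem_set hrow with h1 | h2
      · exact hrows _ h1
      · subst h2; simpa using hrowlen
  · intro R C hR hC
    unfold getC setCell
    rw [getD_set_char']
    by_cases hrR : r.toNat = R
    · subst hrR
      rw [if_pos ⟨rfl, by omega⟩]
      rw [getD_set_char, hrowlen]
      by_cases hcC : c.toNat = C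
      · simp [hcC, hC]
      · simp [hcC]
    · rw [if_neg (by simp [hrR, hlen])]
      simp [hrR]
-- a fold whose every step writes at most one cell, always with the value
-- val(target): the result at (R,C) is val R C iff some step writes (R,C)
lemma foldl_writes {α : Type} (L : List α) (f : List (List Int) → α → List (List Int))
    (h w : Nat) (P : α → Nat → Nat → Bool) (val : Nat → Nat → Int)
    (hf : ∀ m, ∀ a ∈ L, Sh h w m → Sh h w (f m a) ∧ ∀ R C, R < h → C < w →
      getC (f m a) R C = if P a R C then val R C else getC m R C) :
    ∀ m, Sh h w m → Sh h w (L.foldl f m) ∧ ∀ R C, R < h → C < w →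
      getC (L.foldl f m) R C = if L.any (fun a => P a R C) then val R C else getC m R C := by
  induction L with
  | nil => intro m hm; exact ⟨hm, fun R C _ _ => by simp⟩
  | cons a t ih =>
    intro m hm
    obtain ⟨hsh1, hget1⟩ := hf m a (List.mem_cons_self) hm
    obtain ⟨hsh2, hget2⟩ := ih (fun m' b hb hm' => hf m' b (List.mem_cons_of_mem a hb) hm') (f m a) hsh1
    refine ⟨hsh2, fun R C hR hC => ?_⟩
    rw [List.foldl_cons] at *
    rw [hget2 R C hR hC, hget1 R C hR hC]
    by_cases h1 : P a R C = true <;> by_cases h2 : (t.any fun b => P b R C) = true <;>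
      simp [h1, h2]
lemma double_loop_char (h w : Nat) (f : List (List Int) → Int → Int → List (List Int))
    (P : Int → Int → Nat → Nat → Bool) (val : Nat → Nat → Int)
    (hf : ∀ m r c, 0 ≤ r → r < (h : Int) → 0 ≤ c → c < (w : Int) → Sh h w m →
      Sh h w (f m r c) ∧ ∀ R C, R < h → C < w →
        getC (f m r c) R C = if P r c R C then val R C else getC m R C)
    (m : List (List Int)) (hm : Sh h w m) :
    Sh h w (List.foldl (fun res r => List.foldl (fun res c => f res r c) res
        (PySem.List.pyRange 0 (w : Int) 1)) m (PySem.List.pyRange 0 (h : Int) 1)) ∧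
    ∀ R C, R < h → C < w →
      getC (List.foldl (fun res r => List.foldl (fun res c => f res r c) res
          (PySem.List.pyRange 0 (w : Int) 1)) m (PySem.List.pyRange 0 (h : Int) 1)) R C =
        if ((PySem.List.pyRange 0 (h : Int) 1).any fun r =>
            (PySem.List.pyRange 0 (w : Int) 1).any fun c => P r c R C) then val R C
        else getC m R C := by
  refine foldl_writes _ _ h w
    (fun r R C => (PySem.List.pyRange 0 (w : Int) 1).any fun c => P r c R C) val ?_ m hm
  intro m' r hrmem hm'
  have hr := PySem.List.mem_pyRange_one.mp hrmem
  exact foldl_writes _ _ h w (fun c => P r c) val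
    (fun m'' c hcmem hm'' =>
      hf m'' r c hr.1 hr.2 (PySem.List.mem_pyRange_one.mp hcmem).1
        (PySem.List.mem_pyRange_one.mp hcmem).2 hm'') m' hm'

-- the common specification of both results: a cell is outline iff it is
-- non-bg and lies on the border or has an in-bounds bg neighbour
def mark (g : List (List Int)) (bg : Int) (R C : Nat) : Bool :=
  (gget g (R : Int) (C : Int) != bg) &&
    (decide (R = 0) || decide (R + 1 = g.length) || decide (C = 0) ||
     decide (C + 1 = (g.headD []).length) ||
     (decide (0 < R) && (gget g ((R : Int) - 1) (C : Int) == bg)) ||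
     (decide (R + 1 < g.length) && (gget g ((R : Int) + 1) (C : Int) == bg)) ||
     (decide (0 < C) && (gget g (R : Int) ((C : Int) - 1) == bg)) ||
     (decide (C + 1 < (g.headD []).length) && (gget g (R : Int) ((C : Int) + 1) == bg)))

set_option maxHeartbeats 2000000 in
lemma anyA_iff (g : List (List Int)) (bg : Int) (R C : Nat)
    (hR : R < g.length) (hC : C < (g.headD []).length) :
    (((PySem.List.pyRange 0 (g.length : Int) 1).any fun r =>
      (PySem.List.pyRange 0 ((g.headD []).length : Int) 1).any fun c =>
        (gget g r c != bg &&
          [((-1 : Int), (0 : Int)), (1, 0), (0, -1), (0, 1)].any fun d =>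
            !(decide (0 ≤ r + d.1) && decide (r + d.1 < (g.length : Int)) &&
              decide (0 ≤ c + d.2) && decide (c + d.2 < ((g.headD []).length : Int))) ||
            gget g (r + d.1) (c + d.2) == bg) &&
        (decide (r = (R : Int)) && decide (c = (C : Int)))) = true) ↔
      mark g bg R C = true := by
  simp only [mark, List.any_eq_true, PySem.List.mem_pyRange_one, List.any_cons, List.any_nil,
    Bool.and_eq_true, Bool.or_eq_true, Bool.not_eq_true', Bool.and_eq_false_iff,
    decide_eq_true_eq, decide_eq_false_iff_not, bne_iff_ne, beq_iff_eq, ne_eq, not_and, not_lt,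
    not_le, or_false]
  constructor
  · rintro ⟨x, ⟨hx0, hxh⟩, y, ⟨hy0, hyw⟩, ⟨hne, hD⟩, rfl, rfl⟩
    refine ⟨hne, ?_⟩
    have eR1 : ((R : Int) + -1) = (R : Int) - 1 := by ring
    have eC1 : ((C : Int) + -1) = (C : Int) - 1 := by ring
    have e0R : ((R : Int) + 0) = (R : Int) := by ring
    have e0C : ((C : Int) + 0) = (C : Int) := by ring
    rw [eR1, eC1, e0R, e0C] at hD
    rcases hD with ((hoob1 | hbg1) | (hoob2 | hbg2) | (hoob3 | hbg3) | (hoob4 | hbg4) | hf)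
    · exact Or.inl (Or.inl (Or.inl (Or.inl (Or.inl (Or.inl (Or.inl (by omega)))))))
    · by_cases hR0 : R = 0
      · exact Or.inl (Or.inl (Or.inl (Or.inl (Or.inl (Or.inl (Or.inl hR0))))))
      · exact Or.inl (Or.inl (Or.inl (Or.inr ⟨by omega, hbg1⟩)))
    · exact Or.inl (Or.inl (Or.inl (Or.inl (Or.inl (Or.inl (Or.inr (by omega)))))))
    · by_cases hR0 : R + 1 = g.length
      · exact Or.inl (Or.inl (Or.inl (Or.inl (Or.inl (Or.inl (Or.inr hR0))))))
      · exact Or.inl (Or.inl (Or.inr ⟨by omega, hbg2⟩))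
    · exact Or.inl (Or.inl (Or.inl (Or.inl (Or.inl (Or.inr (by omega))))))
    · by_cases hC0 : C = 0
      · exact Or.inl (Or.inl (Or.inl (Or.inl (Or.inl (Or.inr hC0)))))
      · exact Or.inl (Or.inr ⟨by omega, hbg3⟩)
    · exact Or.inl (Or.inl (Or.inl (Or.inl (Or.inr (by omega)))))
    · by_cases hC0 : C + 1 = (g.headD []).length
      · exact Or.inl (Or.inl (Or.inl (Or.inl (Or.inr hC0))))
      · exact Or.inr ⟨by omega, hbg4⟩
    · exact absurd hf (by decide)
  · rintro ⟨hne, hD⟩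
    refine ⟨(R : Int), ⟨by omega, by omega⟩, (C : Int), ⟨by omega, by omega⟩, ⟨⟨hne, ?_⟩, rfl, rfl⟩⟩
    have eR1 : ((R : Int) + -1) = (R : Int) - 1 := by ring
    have eC1 : ((C : Int) + -1) = (C : Int) - 1 := by ring
    have e0R : ((R : Int) + 0) = (R : Int) := by ring
    have e0C : ((C : Int) + 0) = (C : Int) := by ring
    rw [eR1, eC1, e0R, e0C]
    rcases hD with (((((((h | h) | h) | h) | h) | h) | h) | h)
    · exact Or.inl (Or.inl (Or.inl (Or.inl (Or.inl (by omega)))))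
    · exact Or.inr (Or.inl (Or.inl (Or.inl (Or.inl (Or.inr (by omega))))))
    · exact Or.inr (Or.inr (Or.inl (Or.inl (Or.inl (Or.inr (by omega))))))
    · exact Or.inr (Or.inr (Or.inr (Or.inl (Or.inl (Or.inr (by omega))))))
    · exact Or.inl (Or.inr h.2)
    · exact Or.inr (Or.inl (Or.inr h.2))
    · exact Or.inr (Or.inr (Or.inl (Or.inr h.2)))
    · exact Or.inr (Or.inr (Or.inr (Or.inl (Or.inr h.2))))

lemma A_char (g : List (List Int)) :
    Sh g.length (g.headD []).length (trace_outline_4 g) ∧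
    ∀ R C, R < g.length → C < (g.headD []).length →
      getC (trace_outline_4 g) R C =
        if mark g (bgOf g) R C then gget g (R : Int) (C : Int) else bgOf g := by
  unfold trace_outline_4
  dsimp only
  obtain ⟨H1, H2⟩ := double_loop_char g.length (g.headD []).length
    (fun res r c =>
      if (gget g r c != bgOf g &&
          [((-1 : Int), (0 : Int)), (1, 0), (0, -1), (0, 1)].any fun d =>
            !(decide (0 ≤ r + d.1) && decide (r + d.1 < (g.length : Int)) &&
              decide (0 ≤ c + d.2) && decide (c + d.2 < ((g.headD []).length : Int))) ||
            gget g (r + d.1) (c + d.2) == bgOf g) = true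
      then setCell res r c (gget g r c) else res)
    (fun r c R C =>
      (gget g r c != bgOf g &&
        [((-1 : Int), (0 : Int)), (1, 0), (0, -1), (0, 1)].any fun d =>
          !(decide (0 ≤ r + d.1) && decide (r + d.1 < (g.length : Int)) &&
            decide (0 ≤ c + d.2) && decide (c + d.2 < ((g.headD []).length : Int))) ||
          gget g (r + d.1) (c + d.2) == bgOf g) &&
      (decide (r = (R : Int)) && decide (c = (C : Int))))
    (fun R C => gget g (R : Int) (C : Int))
    (by
      intro m r c hr0 hr hc0 hc hm
      beta_reduce
      by_cases hcond : (gget g r c != bgOf g &&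
          [((-1 : Int), (0 : Int)), (1, 0), (0, -1), (0, 1)].any fun d =>
            !(decide (0 ≤ r + d.1) && decide (r + d.1 < (g.length : Int)) &&
              decide (0 ≤ c + d.2) && decide (c + d.2 < ((g.headD []).length : Int))) ||
            gget g (r + d.1) (c + d.2) == bgOf g) = true
      · rw [if_pos hcond]
        obtain ⟨hs, hg⟩ := setCell_props g.length (g.headD []).length m hm r c hr0 hr hc0 hc (gget g r c)
        refine ⟨hs, fun R C hR hC => ?_⟩
        rw [hg R C hR hC]
        by_cases hrc : r = (R : Int) ∧ c = (C : Int)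
        · obtain ⟨e1, e2⟩ := hrc
          subst e1; subst e2
          rw [if_pos (by omega), if_pos (by rw [hcond]; simp)]
        · rw [if_neg (by omega), if_neg (by
            simp only [Bool.and_eq_true, decide_eq_true_eq]
            tauto)]
      · rw [if_neg hcond]
        refine ⟨hm, fun R C hR hC => ?_⟩
        rw [if_neg (fun hx => hcond ((Bool.and_eq_true _ _).mp hx).1)])
    (List.replicate g.length (List.replicate (g.headD []).length (bgOf g)))
    (sh_replicate g.length (g.headD []).length (bgOf g))
  refine ⟨H1, fun R C hR hC => ?_⟩
  have h2 := H2 R C hR hC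
  rw [getC_replicate g.length (g.headD []).length (bgOf g) R C hR hC] at h2
  by_cases hmk : mark g (bgOf g) R C = true
  · rw [h2, if_pos ((anyA_iff g (bgOf g) R C hR hC).mpr hmk), if_pos hmk]
  · rw [h2, if_neg (fun hx => hmk ((anyA_iff g (bgOf g) R C hR hC).mp hx)), if_neg hmk]

lemma B1_char (g : List (List Int)) :
    Sh g.length (g.headD []).length
      (List.foldl
        (fun res r =>
          List.foldl
            (fun res c =>
              if (gget g r c == bgOf g) = true then
                List.foldl
                  (fun res p =>
                    if (decide (0 ≤ p.1) && decide (p.1 < (g.length : Int)) && decide (0 ≤ p.2) &&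
                          decide (p.2 < ((g.headD []).length : Int)) &&
                        gget g p.1 p.2 != bgOf g) = true then
                      setCell res p.1 p.2 (gget g p.1 p.2)
                    else res)
                  res [(r - 1, c), (r + 1, c), (r, c - 1), (r, c + 1)]
              else res)
            res (PySem.List.pyRange 0 ((g.headD []).length : Int) 1))
        (List.replicate g.length (List.replicate (g.headD []).length (bgOf g)))
        (PySem.List.pyRange 0 (g.length : Int) 1)) ∧
    ∀ R C, R < g.length → C < (g.headD []).length →
      getC
        (List.foldl
          (fun res r =>
            List.foldl
              (fun res c =>
                if (gget g r c == bgOf g) = true then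
                  List.foldl
                    (fun res p =>
                      if (decide (0 ≤ p.1) && decide (p.1 < (g.length : Int)) && decide (0 ≤ p.2) &&
                            decide (p.2 < ((g.headD []).length : Int)) &&
                          gget g p.1 p.2 != bgOf g) = true then
                        setCell res p.1 p.2 (gget g p.1 p.2)
                      else res)
                    res [(r - 1, c), (r + 1, c), (r, c - 1), (r, c + 1)]
                else res)
              res (PySem.List.pyRange 0 ((g.headD []).length : Int) 1))
          (List.replicate g.length (List.replicate (g.headD []).length (bgOf g)))
          (PySem.List.pyRange 0 (g.length : Int) 1)) R C =
        if ((PySem.List.pyRange 0 (g.length : Int) 1).any fun r =>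
            (PySem.List.pyRange 0 ((g.headD []).length : Int) 1).any fun c =>
              (gget g r c == bgOf g) &&
                ([(r - 1, c), (r + 1, c), (r, c - 1), (r, c + 1)].any fun p =>
                  ((decide (0 ≤ p.1) && decide (p.1 < (g.length : Int)) && decide (0 ≤ p.2) &&
                      decide (p.2 < ((g.headD []).length : Int)) &&
                    gget g p.1 p.2 != bgOf g)) &&
                  (decide (p.1 = (R : Int)) && decide (p.2 = (C : Int))))) then
          gget g (R : Int) (C : Int)
        else bgOf g := by
  obtain ⟨S1, G1⟩ := double_loop_char g.length (g.headD []).length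
    (fun res r c =>
      if (gget g r c == bgOf g) = true then
        List.foldl
          (fun res p =>
            if (decide (0 ≤ p.1) && decide (p.1 < (g.length : Int)) && decide (0 ≤ p.2) &&
                  decide (p.2 < ((g.headD []).length : Int)) &&
                gget g p.1 p.2 != bgOf g) = true then
              setCell res p.1 p.2 (gget g p.1 p.2)
            else res)
          res [(r - 1, c), (r + 1, c), (r, c - 1), (r, c + 1)]
      else res)
    (fun r c R C =>
      (gget g r c == bgOf g) &&
        ([(r - 1, c), (r + 1, c), (r, c - 1), (r, c + 1)].any fun p =>
          ((decide (0 ≤ p.1) && decide (p.1 < (g.length : Int)) && decide (0 ≤ p.2) &&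
              decide (p.2 < ((g.headD []).length : Int)) &&
            gget g p.1 p.2 != bgOf g)) &&
          (decide (p.1 = (R : Int)) && decide (p.2 = (C : Int)))))
    (fun R C => gget g (R : Int) (C : Int))
    (by
      intro m r c hr0 hr hc0 hc hm
      beta_reduce
      by_cases hbgc : (gget g r c == bgOf g) = true
      · rw [if_pos hbgc]
        obtain ⟨Si, Gi⟩ := foldl_writes [(r - 1, c), (r + 1, c), (r, c - 1), (r, c + 1)]
          (fun res p =>
            if (decide (0 ≤ p.1) && decide (p.1 < (g.length : Int)) && decide (0 ≤ p.2) &&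
                  decide (p.2 < ((g.headD []).length : Int)) &&
                gget g p.1 p.2 != bgOf g) = true then
              setCell res p.1 p.2 (gget g p.1 p.2)
            else res)
          g.length (g.headD []).length
          (fun p R C =>
            ((decide (0 ≤ p.1) && decide (p.1 < (g.length : Int)) && decide (0 ≤ p.2) &&
                decide (p.2 < ((g.headD []).length : Int)) &&
              gget g p.1 p.2 != bgOf g)) &&
            (decide (p.1 = (R : Int)) && decide (p.2 = (C : Int))))
          (fun R C => gget g (R : Int) (C : Int))
          (by
            intro m' p hpmem hm'
            beta_reduce
            by_cases hcond : (decide (0 ≤ p.1) && decide (p.1 < (g.length : Int)) && decide (0 ≤ p.2) &&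
                  decide (p.2 < ((g.headD []).length : Int)) &&
                gget g p.1 p.2 != bgOf g) = true
            · rw [if_pos hcond]
              have hx := hcond
              simp only [Bool.and_eq_true, decide_eq_true_eq] at hx
              obtain ⟨⟨⟨⟨h1, h2⟩, h3⟩, h4⟩, h5⟩ := hx
              obtain ⟨hs, hg⟩ := setCell_props g.length (g.headD []).length m' hm' p.1 p.2 h1 h2 h3 h4 (gget g p.1 p.2)
              refine ⟨hs, fun R C hR hC => ?_⟩
              rw [hg R C hR hC]
              by_cases hpc : p.1 = (R : Int) ∧ p.2 = (C : Int)
              · rw [if_pos (by omega), if_pos (by rw [hcond]; simp [hpc.1, hpc.2]), hpc.1, hpc.2]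
              · rw [if_neg (by omega), if_neg (by
                  simp only [Bool.and_eq_true, decide_eq_true_eq]
                  tauto)]
            · rw [if_neg hcond]
              exact ⟨hm', fun R C hR hC => by
                rw [if_neg (fun hx => hcond ((Bool.and_eq_true _ _).mp hx).1)]⟩)
          m hm
        refine ⟨Si, fun R C hR hC => ?_⟩
        rw [Gi R C hR hC, hbgc, Bool.true_and]
      · rw [if_neg hbgc]
        exact ⟨hm, fun R C hR hC => by
          rw [if_neg (fun hx => hbgc ((Bool.and_eq_true _ _).mp hx).1)]⟩)
    (List.replicate g.length (List.replicate (g.headD []).length (bgOf g)))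
    (sh_replicate g.length (g.headD []).length (bgOf g))
  refine ⟨S1, fun R C hR hC => ?_⟩
  rw [G1 R C hR hC, getC_replicate g.length (g.headD []).length (bgOf g) R C hR hC]

lemma anyB_iff (g : List (List Int)) (bg : Int) (R C : Nat)
    (hR : R < g.length) (hC : C < (g.headD []).length) :
    (((PySem.List.pyRange 0 (g.length : Int) 1).any fun r =>
            (PySem.List.pyRange 0 ((g.headD []).length : Int) 1).any fun c =>
              ((r == 0 || r == (g.length : Int) - 1 || c == 0 || c == ((g.headD []).length : Int) - 1) &&
                gget g r c != bg) &&
              (decide (r = (R : Int)) && decide (c = (C : Int)))) = true ∨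
     ((PySem.List.pyRange 0 (g.length : Int) 1).any fun r =>
            (PySem.List.pyRange 0 ((g.headD []).length : Int) 1).any fun c =>
              (gget g r c == bg) &&
                ([(r - 1, c), (r + 1, c), (r, c - 1), (r, c + 1)].any fun p =>
                  ((decide (0 ≤ p.1) && decide (p.1 < (g.length : Int)) && decide (0 ≤ p.2) &&
                      decide (p.2 < ((g.headD []).length : Int)) &&
                    gget g p.1 p.2 != bg)) &&
                  (decide (p.1 = (R : Int)) && decide (p.2 = (C : Int))))) = true) ↔ mark g bg R C = true := by
  simp only [mark, List.any_eq_true, PySem.List.mem_pyRange_one, List.any_cons, List.any_nil,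
    Bool.and_eq_true, Bool.or_eq_true, Bool.not_eq_true', Bool.and_eq_false_iff,
    decide_eq_true_eq, decide_eq_false_iff_not, bne_iff_ne, beq_iff_eq, ne_eq, not_lt,
    not_le, or_false]
  constructor
  · rintro (⟨x, ⟨hx0, hxh⟩, y, ⟨hy0, hyw⟩, ⟨hbord, hne⟩, rfl, rfl⟩ |
            ⟨x, ⟨hx0, hxh⟩, y, ⟨hy0, hyw⟩, hbg, hnb⟩)
    · refine ⟨hne, ?_⟩
      rcases hbord with ((h | h) | h) | h
      · exact Or.inl (Or.inl (Or.inl (Or.inl (Or.inl (Or.inl (Or.inl (by omega)))))))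
      · exact Or.inl (Or.inl (Or.inl (Or.inl (Or.inl (Or.inl (Or.inr (by omega)))))))
      · exact Or.inl (Or.inl (Or.inl (Or.inl (Or.inl (Or.inr (by omega))))))
      · exact Or.inl (Or.inl (Or.inl (Or.inl (Or.inr (by omega)))))
    · rcases hnb with h | h | h | h | hf
      · obtain ⟨⟨⟨⟨⟨hb1, hb2⟩, hb3⟩, hb4⟩, hne'⟩, hxe, rfl⟩ := h
        have ex : x = (R : Int) + 1 := by omega
        subst ex
        rw [show ((R : Int) + 1 - 1) = (R : Int) from by ring] at hne'
        exact ⟨hne', Or.inl (Or.inl (Or.inr ⟨by omega, hbg⟩))⟩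
      · obtain ⟨⟨⟨⟨⟨hb1, hb2⟩, hb3⟩, hb4⟩, hne'⟩, hxe, rfl⟩ := h
        have ex : x = (R : Int) - 1 := by omega
        subst ex
        rw [show ((R : Int) - 1 + 1) = (R : Int) from by ring] at hne'
        exact ⟨hne', Or.inl (Or.inl (Or.inl (Or.inr ⟨by omega, hbg⟩)))⟩
      · obtain ⟨⟨⟨⟨⟨hb1, hb2⟩, hb3⟩, hb4⟩, hne'⟩, rfl, hye⟩ := h
        have ey : y = (C : Int) + 1 := by omega
        subst ey
        rw [show ((C : Int) + 1 - 1) = (C : Int) from by ring] at hne'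
        exact ⟨hne', Or.inr ⟨by omega, hbg⟩⟩
      · obtain ⟨⟨⟨⟨⟨hb1, hb2⟩, hb3⟩, hb4⟩, hne'⟩, rfl, hye⟩ := h
        have ey : y = (C : Int) - 1 := by omega
        subst ey
        rw [show ((C : Int) - 1 + 1) = (C : Int) from by ring] at hne'
        exact ⟨hne', Or.inl (Or.inr ⟨by omega, hbg⟩)⟩
      · exact absurd hf (by decide)
  · rintro ⟨hne, hD⟩
    rcases hD with (((((((h | h) | h) | h) | h) | h) | h) | h)
    · exact Or.inl ⟨(R : Int), ⟨by omega, by omega⟩, (C : Int), ⟨by omega, by omega⟩,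
        ⟨Or.inl (Or.inl (Or.inl (by omega))), hne⟩, rfl, rfl⟩
    · exact Or.inl ⟨(R : Int), ⟨by omega, by omega⟩, (C : Int), ⟨by omega, by omega⟩,
        ⟨Or.inl (Or.inl (Or.inr (by omega))), hne⟩, rfl, rfl⟩
    · exact Or.inl ⟨(R : Int), ⟨by omega, by omega⟩, (C : Int), ⟨by omega, by omega⟩,
        ⟨Or.inl (Or.inr (by omega)), hne⟩, rfl, rfl⟩
    · exact Or.inl ⟨(R : Int), ⟨by omega, by omega⟩, (C : Int), ⟨by omega, by omega⟩,
        ⟨Or.inr (by omega), hne⟩, rfl, rfl⟩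
    · refine Or.inr ⟨(R : Int) - 1, ⟨by omega, by omega⟩, (C : Int), ⟨by omega, by omega⟩, h.2,
        Or.inr (Or.inl ⟨⟨⟨⟨⟨by omega, by omega⟩, by omega⟩, by omega⟩, ?_⟩, by omega, rfl⟩)⟩
      rw [show ((R : Int) - 1 + 1) = (R : Int) from by ring]
      exact hne
    · refine Or.inr ⟨(R : Int) + 1, ⟨by omega, by omega⟩, (C : Int), ⟨by omega, by omega⟩, h.2,
        Or.inl ⟨⟨⟨⟨⟨by omega, by omega⟩, by omega⟩, by omega⟩, ?_⟩, by omega, rfl⟩⟩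
      rw [show ((R : Int) + 1 - 1) = (R : Int) from by ring]
      exact hne
    · refine Or.inr ⟨(R : Int), ⟨by omega, by omega⟩, (C : Int) - 1, ⟨by omega, by omega⟩, h.2,
        Or.inr (Or.inr (Or.inr (Or.inl ⟨⟨⟨⟨⟨by omega, by omega⟩, by omega⟩, by omega⟩, ?_⟩, rfl, by omega⟩)))⟩
      rw [show ((C : Int) - 1 + 1) = (C : Int) from by ring]
      exact hne
    · refine Or.inr ⟨(R : Int), ⟨by omega, by omega⟩, (C : Int) + 1, ⟨by omega, by omega⟩, h.2,
        Or.inr (Or.inr (Or.inl ⟨⟨⟨⟨⟨by omega, by omega⟩, by omega⟩, by omega⟩, ?_⟩, rfl, by omega⟩))⟩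
      rw [show ((C : Int) + 1 - 1) = (C : Int) from by ring]
      exact hne

lemma B_char (g : List (List Int)) :
    Sh g.length (g.headD []).length (trace_outline_4_alt g) ∧
    ∀ R C, R < g.length → C < (g.headD []).length →
      getC (trace_outline_4_alt g) R C =
        if mark g (bgOf g) R C then gget g (R : Int) (C : Int) else bgOf g := by
  unfold trace_outline_4_alt
  dsimp only
  obtain ⟨S1, G1⟩ := B1_char g
  obtain ⟨S2, G2⟩ := double_loop_char g.length (g.headD []).length
    (fun res r c =>
      if ((r == 0 || r == (g.length : Int) - 1 || c == 0 || c == ((g.headD []).length : Int) - 1) &&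
          gget g r c != bgOf g) = true
      then setCell res r c (gget g r c) else res)
    (fun r c R C =>
      ((r == 0 || r == (g.length : Int) - 1 || c == 0 || c == ((g.headD []).length : Int) - 1) &&
        gget g r c != bgOf g) &&
      (decide (r = (R : Int)) && decide (c = (C : Int))))
    (fun R C => gget g (R : Int) (C : Int))
    (by
      intro m r c hr0 hr hc0 hc hm
      beta_reduce
      by_cases hcond : ((r == 0 || r == (g.length : Int) - 1 || c == 0 || c == ((g.headD []).length : Int) - 1) &&
          gget g r c != bgOf g) = true
      · rw [if_pos hcond]
        obtain ⟨hs, hg⟩ := setCell_props g.length (g.headD []).length m hm r c hr0 hr hc0 hc (gget g r c)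
        refine ⟨hs, fun R C hR hC => ?_⟩
        rw [hg R C hR hC]
        by_cases hrc : r = (R : Int) ∧ c = (C : Int)
        · obtain ⟨e1, e2⟩ := hrc
          subst e1; subst e2
          rw [if_pos (by omega), if_pos (by rw [hcond]; simp)]
        · rw [if_neg (by omega), if_neg (by
            simp only [Bool.and_eq_true, decide_eq_true_eq]
            tauto)]
      · rw [if_neg hcond]
        exact ⟨hm, fun R C hR hC => by
          rw [if_neg (fun hx => hcond ((Bool.and_eq_true _ _).mp hx).1)]⟩)
    (List.foldl
        (fun res r =>
          List.foldl
            (fun res c =>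
              if (gget g r c == bgOf g) = true then
                List.foldl
                  (fun res p =>
                    if (decide (0 ≤ p.1) && decide (p.1 < (g.length : Int)) && decide (0 ≤ p.2) &&
                          decide (p.2 < ((g.headD []).length : Int)) &&
                        gget g p.1 p.2 != bgOf g) = true then
                      setCell res p.1 p.2 (gget g p.1 p.2)
                    else res)
                  res [(r - 1, c), (r + 1, c), (r, c - 1), (r, c + 1)]
              else res)
            res (PySem.List.pyRange 0 ((g.headD []).length : Int) 1))
        (List.replicate g.length (List.replicate (g.headD []).length (bgOf g)))
        (PySem.List.pyRange 0 (g.length : Int) 1))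
    S1
  refine ⟨S2, fun R C hR hC => ?_⟩
  have h2 := G2 R C hR hC
  rw [G1 R C hR hC] at h2
  rw [h2]
  by_cases hmk : mark g (bgOf g) R C = true
  · rw [if_pos hmk]
    split_ifs with h1 h2
    · rfl
    · rfl
    · rcases (anyB_iff g (bgOf g) R C hR hC).mpr hmk with ha | ha
      · exact absurd ha h1
      · exact absurd ha h2
  · rw [if_neg hmk]
    have hno := fun hor => hmk ((anyB_iff g (bgOf g) R C hR hC).mp hor)
    rw [if_neg (fun hx => hno (Or.inl hx)), if_neg (fun hx => hno (Or.inr hx))]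

lemma matrix_ext (h w : Nat) (m m' : List (List Int)) (hm : Sh h w m) (hm' : Sh h w m')
    (hpt : ∀ R C, R < h → C < w → getC m R C = getC m' R C) : m = m' := by
  obtain ⟨hl, hr⟩ := hm
  obtain ⟨hl', hr'⟩ := hm'
  apply List.ext_getElem (by omega)
  intro i hi hi'
  have hiw : m[i].length = w := hr _ (List.getElem_mem hi)
  have hiw' : m'[i].length = w := hr' _ (List.getElem_mem hi')
  apply List.ext_getElem (by omega)
  intro j hj hj'
  have := hpt i j (by omega) (by omega)
  unfold getC at this
  rw [List.getD_eq_getElem m [] (by omega), List.getD_eq_getElem m' [] (by omega),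
    List.getD_eq_getElem _ 0 (by omega), List.getD_eq_getElem _ 0 (by omega)] at this
  exact this
-- ===== VERDICT (by name: the statement is the Claim_ definition above) =====
theorem trace_outline_4_spec : Claim_equal_trace_outline_4 := by
  intro g _ _
  unfold Spec_trace_outline_4
  obtain ⟨hA, hAc⟩ := A_char g
  obtain ⟨hB, hBc⟩ := B_char g
  exact matrix_ext _ _ _ _ hA hB (fun R C hR hC => by rw [hAc R C hR hC, hBc R C hR hC])
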